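-- pv_equiv track=rewrite | github.com/Aom-Aursudkit/SudoSolveAll | python/sorbbb/Onepiece.py | Onepiece
-- ===== SOURCE A (Python) =====
-- def Onepiece(x):
--     if type(x) is str:
--         countx = len(x)
--         xx = x.lower()
--         search = 0
--         ans = ""
--         space = 0
--         for i in range(countx):
--             if xx[i] == "l" and search == 0:
--                 for i1 in range(i, countx):
--                     if xx[i1] == " ":
--                         space = 1
--                         break
--                     if xx[i1] != "l" and xx[i1] != "u" and xx[i1] != "f" and xx[i1] != "y":
--                         noo = 1
--                         break
--                     else:
--                         noo = 0
--                 if space == 1: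
--                     ans = ans + " "
--                     space = 0
--                 if noo == 0:
--                     ans = ans + "Lufy"
--                 i = i1
--         return ans
--
--     else:
--         return "Error"
-- ===== SOURCE B (Python) =====
-- def Onepiece(x):
--     # One backward pass: tag[i] classifies the first non-{l,u,f,y} char at or
--     # after i (0 = none/end, 1 = space, 2 = other); each 'l' contributes a piece.
--     if type(x) is not str:
--         return "Error"
--     xx = x.lower()
--     tag = 0
--     pieces = []
--     for c in reversed(xx):
--         if c == ' ':
--             tag = 1
--         elif c not in 'lufy':
--             tag = 2
--         if c == 'l':
--             pieces.append("Lufy" if tag == 0 else (" Lufy" if tag == 1 else ""))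
--     return "".join(reversed(pieces))
-- ===== Notes on version B (the rewrite author's own statement) =====
-- stated objective: alternative
-- what changed: A rescans the suffix from every 'l' with a nested forward loop; B makes a single backward pass carrying the classification of the next non-{l,u,f,y} character and emits each 'l''s piece from that state.
import Mathlib
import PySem

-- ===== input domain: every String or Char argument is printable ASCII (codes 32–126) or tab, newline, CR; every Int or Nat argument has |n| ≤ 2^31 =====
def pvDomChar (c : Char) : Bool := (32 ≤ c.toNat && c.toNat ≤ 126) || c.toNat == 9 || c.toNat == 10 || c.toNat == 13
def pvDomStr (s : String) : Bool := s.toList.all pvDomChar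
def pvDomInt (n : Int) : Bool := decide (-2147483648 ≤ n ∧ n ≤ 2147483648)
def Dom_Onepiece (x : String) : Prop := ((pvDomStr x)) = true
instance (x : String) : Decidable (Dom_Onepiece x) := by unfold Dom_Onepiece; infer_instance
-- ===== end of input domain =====

-- B replaces A's forward rescan at every 'l' by one backward pass that carries the
-- classification of the next non-{l,u,f,y} character (objective: alternative algorithm).

-- ===== PORT A =====
-- inner loop 'for i1 in range(i, countx)' of A over the suffix starting at i;
-- returns the (space, noo) pair the loop leaves behind (Python's 'i = i1' after it is
-- dead: it does not affect the range loop).  noo is always assigned before the loop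
-- can end, since the first character examined is the 'l' itself.
def pvInnerA : List Char → Int → Int → Int × Int
  | [], space, noo => (space, noo)
  | c :: rest, space, noo =>
    if c = ' ' then (1, noo)
    else if c ≠ 'l' ∧ c ≠ 'u' ∧ c ≠ 'f' ∧ c ≠ 'y' then (space, 1)
    else pvInnerA rest space 0

-- outer loop of A; state (ans, search, space, noo); noo starts unbound in Python but is
-- written before it is ever read, so its initial value (0 here) is irrelevant.
def pvOuterA : List Char → String → Int → Int → Int → String
  | [], ans, _, _, _ => ans
  | c :: rest, ans, search, space, noo =>
    if c = 'l' ∧ search = 0 then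
      let p := pvInnerA (c :: rest) space noo
      let ans1 := if p.1 = 1 then ans ++ " " else ans
      let space1 := if p.1 = 1 then (0 : Int) else p.1
      let ans2 := if p.2 = 0 then ans1 ++ "Lufy" else ans1
      pvOuterA rest ans2 search space1 p.2
    else pvOuterA rest ans search space noo

def Onepiece (x : String) : String :=
  pvOuterA (PySem.Str.lower x).toList "" 0 0 0

-- ===== PORT B =====
-- one step of B's backward loop: state (tag, pieces)
def pvStepB (st : Int × List String) (c : Char) : Int × List String :=
  let tag := if c = ' ' then (1 : Int)
             else if ¬(c = 'l' ∨ c = 'u' ∨ c = 'f' ∨ c = 'y') then 2 else st.1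
  let pieces := if c = 'l' then
      st.2 ++ [if tag = 0 then "Lufy" else if tag = 1 then " Lufy" else ""]
    else st.2
  (tag, pieces)

def Onepiece_alt (x : String) : String :=
  let xx := (PySem.Str.lower x).toList
  let st := xx.reverse.foldl pvStepB ((0 : Int), ([] : List String))
  PySem.Str.join "" st.2.reverse

-- ===== PRECONDITION & SPEC =====
def Spec_Onepiece (x : String) (out : String) : Prop := out = Onepiece_alt x
instance (x : String) (out : String) : Decidable (Spec_Onepiece x out) := by unfold Spec_Onepiece; infer_instance

-- ===== CLAIM (what is proved, stated in full; the proofs are below) =====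
def Claim_equal_Onepiece : Prop := ∀ (x : String), Dom_Onepiece x → Spec_Onepiece x (Onepiece x)

-- ===== LEMMAS AND PROOFS =====

-- classification of the first non-{l,u,f,y} character of a suffix:
-- 0 = there is none, 1 = it is a space, 2 = anything else
def pvCls : List Char → Int
  | [] => 0
  | c :: r => if c = ' ' then 1 else if ¬(c = 'l' ∨ c = 'u' ∨ c = 'f' ∨ c = 'y') then 2 else pvCls r

def pvPiece (t : Int) : String := if t = 0 then "Lufy" else if t = 1 then " Lufy" else ""

-- the common value: per 'l' in the (lowered) list, the piece for its suffix
def pvF : List Char → String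
  | [] => ""
  | c :: r => (if c = 'l' then pvPiece (pvCls r) else "") ++ pvF r

-- pieces accumulated by B's backward fold (in back-to-front order)
def pvPB : List Char → List String
  | [] => []
  | c :: r => pvPB r ++ (if c = 'l' then [pvPiece (pvCls r)] else [])

lemma pvCls_range (s : List Char) : pvCls s = 0 ∨ pvCls s = 1 ∨ pvCls s = 2 := by
  induction s with
  | nil => simp [pvCls]
  | cons c r ih =>
    by_cases h1 : c = ' ' <;> by_cases h2 : ¬(c = 'l' ∨ c = 'u' ∨ c = 'f' ∨ c = 'y') <;>
      simp only [pvCls, h1, h2, if_true, if_false] <;> simp [ih]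

lemma pvInnerA_eq (s : List Char) (space : Int) :
    pvInnerA s space 0 =
      if pvCls s = 1 then (1, 0) else if pvCls s = 2 then (space, 1) else (space, 0) := by
  induction s generalizing space with
  | nil => simp [pvInnerA, pvCls]
  | cons c r ih =>
    by_cases h1 : c = ' '
    · simp [pvInnerA, pvCls, h1]
    · by_cases h2 : ¬(c = 'l' ∨ c = 'u' ∨ c = 'f' ∨ c = 'y')
      · have h2' : c ≠ 'l' ∧ c ≠ 'u' ∧ c ≠ 'f' ∧ c ≠ 'y' := by tauto
        simp [pvInnerA, pvCls, h1, h2']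
      · have h2' : ¬(c ≠ 'l' ∧ c ≠ 'u' ∧ c ≠ 'f' ∧ c ≠ 'y') := by tauto
        simp only [pvInnerA, pvCls, if_neg h1, if_neg h2', if_neg h2]
        exact ih space

lemma pvOuterA_eq (l : List Char) : ∀ (ans : String) (noo : Int),
    pvOuterA l ans 0 0 noo = ans ++ pvF l := by
  induction l with
  | nil => intro ans noo; simp [pvOuterA, pvF]
  | cons c r ih =>
    intro ans noo
    by_cases hl : c = 'l'
    · subst hl
      have hinner : pvInnerA ('l' :: r) 0 noo = pvInnerA r 0 0 := by
        simp [pvInnerA]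
      rcases pvCls_range r with h | h | h
      · simp [pvOuterA, hinner, pvInnerA_eq, h, ih, pvF, pvPiece, String.append_assoc]
      · simp [pvOuterA, hinner, pvInnerA_eq, h, ih, pvF, pvPiece, String.append_assoc]
      · simp [pvOuterA, hinner, pvInnerA_eq, h, ih, pvF, pvPiece, String.append_assoc]
    · simp [pvOuterA, hl, ih, pvF]

lemma pvStepB_foldl (l : List Char) :
    l.reverse.foldl pvStepB ((0 : Int), ([] : List String)) = (pvCls l, pvPB l) := by
  induction l with
  | nil => simp [pvCls, pvPB]
  | cons c r ih =>
    rw [List.reverse_cons, List.foldl_append, ih]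
    by_cases h1 : c = ' '
    · have hl : c ≠ 'l' := by simp [h1]
      simp [pvStepB, pvCls, pvPB, h1, hl]
    · by_cases h2 : ¬(c = 'l' ∨ c = 'u' ∨ c = 'f' ∨ c = 'y')
      · have hl : c ≠ 'l' := by tauto
        simp [pvStepB, pvCls, pvPB, h1, h2, hl]
      · by_cases hl : c = 'l'
        · simp [pvStepB, pvCls, pvPB, h1, hl, pvPiece]
        · simp [pvStepB, pvCls, pvPB, h1, h2, hl]

lemma pvJoin_cons (s : String) (rest : List String) :
    PySem.Str.join "" (s :: rest) = s ++ PySem.Str.join "" rest := by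
  cases rest with
  | nil => simp [PySem.Str.join, PySem.Chars.join, List.intercalate]
  | cons q r => simp [PySem.Str.join, PySem.Chars.join_cons_cons, String.ofList_append]

lemma pvJoin_pvPB (l : List Char) : PySem.Str.join "" (pvPB l).reverse = pvF l := by
  induction l with
  | nil => simp [pvPB, pvF, PySem.Str.join, PySem.Chars.join, List.intercalate]
  | cons c r ih =>
    by_cases hl : c = 'l'
    · simp [pvPB, pvF, hl, pvJoin_cons, ih]
    · simp [pvPB, pvF, hl, ih]

-- ===== VERDICT (by name: the statement is the Claim_ definition above) =====
theorem Onepiece_spec : Claim_equal_Onepiece := by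
  intro x _
  show Onepiece x = Onepiece_alt x
  simp only [Onepiece, Onepiece_alt]
  rw [pvOuterA_eq, pvStepB_foldl, pvJoin_pvPB]
  simp
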